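-- pv_equiv track=rewrite | github.com/ccirelli2/Daily_coding_problems | v2.py | driver_function
-- ===== SOURCE A (Python) =====
-- def get_rev_order(string):
--
--     # Check if single letter
--     if len(string) == 1:
--         return string
--
--     else:
--         # Convert String to List
--         list_string= list(string)
--         # Object 4 Reverse List
--         rev_order_list = []
--         len_list = len(list_string)
--
--         # Create a Sequence That Iterates 0 - len(list) in reverse order
--         for x in range(len_list-1, -1, -1):
--             # Append to rev_order_list each value in list that coincides to index = x
--             rev_order_list.append(list_string[x])
--     # Return Original List in reverse
--     return (rev_order_list)
--
-- def driver_function(string):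
--     len_string = len(string)
--     list_string = list(string)
--
--     # Intermediary List of Palidrome
--     intermed_palidrome = []
--
--     # Create Step Starting at 0
--     for step in range(0, len_string):
--
--         # Iterate String:
--         for letter in range(step + 1, len_string + 1):
--
--             letter_combo = list_string[step:letter]
--             rev_letter_combo = get_rev_order(letter_combo)
--
--             # Check if Palidrome exists
--             if letter_combo == rev_letter_combo:
--
--                 # If letter == 1
--                 if letter == 1 and len(letter_combo) != 0:
--                     intermed_palidrome.append(letter_combo)
--
--                 # If not the first letter of the sequence, check to see if palidrome overlaps + is longer
--                 # than the preceding palidrome.  Overlaps means that the first letter of the next palidrome is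
--                 # in the first palidrome.
--                 # anna!frank
--                 else:
--                     # Establish index position of last letter of the last palidrome added to list
--                     num_char_list_palidromes = sum([len(x) for x in intermed_palidrome]) - 1
--                     # If my present step is less than the last index position of the last appended palidrome, then
--                     # I know there is overlap. Therefore, and if there is overlap, I should not append a new palidrome
--                     #whose length is less than the preceding palidrome if there is overlap
--
--                     # If smaller, then there is overlap.  Therefore, we should not append a new palidrome whose len
--                     # is less than the preceding palidrome
--                     #elif step < num_char_list_palidromes and len(letter_combo) < len(intermed_palidrome[-1]):
--                     #    pass
--
--                     # If smaller, and longer than the preceding palidrome, then we need to replace the last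
--                     # palidrome with the letters that don't overlap as one value in the list, and then add the palidrome
--                     if step <= num_char_list_palidromes and len(letter_combo) > len(intermed_palidrome[-1]):
--
--                         # Step 1:  Isolate the last palidrome
--                         last_palidrome = intermed_palidrome[-1]
--                         # Step 2: Drop last palidrome from the list
--                         intermed_palidrome.remove(last_palidrome)
--                         # Step3:  Append the piece that overlaps with the new palidrome
--                         len_new_palidrome = len(letter_combo) * -1
--                         overlap           = last_palidrome[0 : len_new_palidrome]
--                         if len(overlap) != 0:
--                             intermed_palidrome.append(overlap)
--                         # Step4:  Append New Palidrome to list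
--                         intermed_palidrome.append(letter_combo)
--
--
--                     # what about if the step is greater? Then we don't need to check the length as there is no overlap.
--                     elif step > num_char_list_palidromes:
--                         intermed_palidrome.append(letter_combo)
--
--     return intermed_palidrome
-- ===== SOURCE B (Python) =====
-- def driver_function(string):
--     n = len(string)
--     # rows[i][j] == True  iff  string[i:j] is a palindrome; built bottom-up from row n
--     rows = [[True] * (n + 1)]
--     for k in range(n):
--         step = n - 1 - k
--         nxt = rows[0]
--         row = [letter - step <= 1 or (string[step] == string[letter - 1] and nxt[letter - 1])
--                for letter in range(n + 1)]
--         rows = [row] + rows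
--     out = []
--     total = 0  # running number of characters currently stored in out
--     for step in range(n):
--         row = rows[step]
--         for letter in range(step + 1, n + 1):
--             if row[letter]:
--                 combo = list(string)[step:letter]
--                 length = letter - step
--                 if letter == 1:
--                     out.append(combo)
--                     total += length
--                 else:
--                     if step <= total - 1 and length > len(out[-1]):
--                         last = out[-1]
--                         out.remove(last)
--                         total -= len(last)
--                         overlap = last[0:-length]
--                         if len(overlap) != 0:
--                             out.append(overlap)
--                             total += len(overlap)
--                         out.append(combo)
--                         total += length
--                     elif step > total - 1:
--                         out.append(combo)
--                         total += length
--     return out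
-- ===== Notes on version B (the rewrite author's own statement) =====
-- stated objective: faster
-- what changed: Replaces the per-substring reverse-and-compare palindrome test (and the sum() recomputed over the whole result list at every hit) with a precomputed O(n^2) palindrome DP row table plus a running character total, keeping the same aggregation of non-overlapping palindromes.
import Mathlib
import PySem

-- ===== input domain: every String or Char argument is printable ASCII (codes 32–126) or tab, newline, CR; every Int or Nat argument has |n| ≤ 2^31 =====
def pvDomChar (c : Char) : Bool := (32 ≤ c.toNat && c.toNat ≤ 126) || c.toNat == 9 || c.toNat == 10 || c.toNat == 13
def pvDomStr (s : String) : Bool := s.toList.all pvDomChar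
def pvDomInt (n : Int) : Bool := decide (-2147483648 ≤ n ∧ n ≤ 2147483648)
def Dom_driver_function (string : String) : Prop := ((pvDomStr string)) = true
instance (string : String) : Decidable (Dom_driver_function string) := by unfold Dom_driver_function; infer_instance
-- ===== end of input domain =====

-- B replaces A's per-substring reverse-and-compare palindrome test and its sum() recomputation
-- by a precomputed palindrome DP row table plus a running character total (objective: faster).

-- ===== PORT A =====

-- get_rev_order: reverse a list by an explicit index loop (A applies it to lists of 1-char strings)
def get_rev_order (l : List String) : List String :=
  if l.length == 1 then l
  else
    (PySem.List.pyRange ((l.length : Int) - 1) (-1) (-1)).foldl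
      (fun acc x => acc ++ [PySem.List.pyGetD l x ""]) []

-- body of A's inner loop, acting on the accumulated list of palindromes
def pvBodyA (list_string : List String) (step : Int) (acc : List (List String)) (letter : Int) :
    List (List String) :=
  let letter_combo := PySem.List.slice list_string (some step) (some letter)
  let rev_letter_combo := get_rev_order letter_combo
  if letter_combo == rev_letter_combo then
    if letter == 1 && !(letter_combo.length == 0) then acc ++ [letter_combo]
    else
      let num : Int := ((acc.map (fun x => (x.length : Int))).sum) - 1
      if decide (step ≤ num) &&
         decide ((letter_combo.length : Int) > ((PySem.List.pyGetD acc (-1) []).length : Int)) then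
        let last_palidrome := PySem.List.pyGetD acc (-1) []
        let acc1 := (PySem.List.remove? acc last_palidrome).getD acc
        let overlap := PySem.List.slice last_palidrome (some 0) (some (-(letter_combo.length : Int)))
        let acc2 := if !(overlap.length == 0) then acc1 ++ [overlap] else acc1
        acc2 ++ [letter_combo]
      else if decide (step > num) then acc ++ [letter_combo]
      else acc
  else acc

def driver_function (string : String) : List (List String) :=
  let len_string : Int := (string.toList.length : Int)
  let list_string : List String := string.toList.map (fun c => String.ofList [c])
  (PySem.List.pyRange 0 len_string 1).foldl
    (fun acc step =>
      (PySem.List.pyRange (step + 1) (len_string + 1) 1).foldl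
        (fun acc letter => pvBodyA list_string step acc letter) acc)
    []

-- ===== PORT B =====

-- one DP row: row[letter] == True iff string[step:letter] is a palindrome, given the row for step+1
def pvRow (ls : List String) (n : Int) (step : Int) (nxt : List Bool) : List Bool :=
  (PySem.List.pyRange 0 (n + 1) 1).map (fun letter =>
    decide (letter - step ≤ 1) ||
      ((PySem.List.pyGetD ls step "" == PySem.List.pyGetD ls (letter - 1) "") &&
        PySem.List.pyGetD nxt (letter - 1) false))

-- rows built bottom-up, newest row prepended (rows[0] is the row for the current lowest step)
def pvRows (ls : List String) (n : Int) : List (List Bool) :=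
  (PySem.List.pyRange 0 n 1).foldl
    (fun rows k => pvRow ls n (n - 1 - k) (PySem.List.pyGetD rows 0 []) :: rows)
    [PySem.List.pyRepeat [true] (n + 1)]

-- body of B's inner loop; state = (out, running total of characters in out)
def pvBodyB (ls : List String) (row : List Bool) (step : Int)
    (st : List (List String) × Int) (letter : Int) : List (List String) × Int :=
  if PySem.List.pyGetD row letter false then
    let combo := PySem.List.slice ls (some step) (some letter)
    let length : Int := letter - step
    if letter == 1 then (st.1 ++ [combo], st.2 + length)
    else if decide (step ≤ st.2 - 1) &&
            decide (length > ((PySem.List.pyGetD st.1 (-1) []).length : Int)) then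
      let last := PySem.List.pyGetD st.1 (-1) []
      let out1 := (PySem.List.remove? st.1 last).getD st.1
      let total1 := st.2 - (last.length : Int)
      let overlap := PySem.List.slice last (some 0) (some (-length))
      let st2 := if !(overlap.length == 0) then (out1 ++ [overlap], total1 + (overlap.length : Int))
                 else (out1, total1)
      (st2.1 ++ [combo], st2.2 + length)
    else if decide (step > st.2 - 1) then (st.1 ++ [combo], st.2 + length)
    else st
  else st

def driver_function_alt (string : String) : List (List String) :=
  let n : Int := (string.toList.length : Int)
  let ls : List String := string.toList.map (fun c => String.ofList [c])
  let rows := pvRows ls n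
  ((PySem.List.pyRange 0 n 1).foldl
    (fun st step =>
      let row := PySem.List.pyGetD rows step []
      (PySem.List.pyRange (step + 1) (n + 1) 1).foldl (pvBodyB ls row step) st)
    ([], 0)).1

-- ===== PRECONDITION & SPEC =====
def Spec_driver_function (string : String) (out : List (List String)) : Prop := out = driver_function_alt string
instance (string : String) (out : List (List String)) : Decidable (Spec_driver_function string out) := by unfold Spec_driver_function; infer_instance

-- ===== CLAIM (what is proved, stated in full; the proofs are below) =====
def Claim_equal_driver_function : Prop := ∀ (string : String), Dom_driver_function string → Spec_driver_function string (driver_function string)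

-- ===== LEMMAS AND PROOFS =====

def pvSl (l : List String) (i j : Nat) : List String := (l.drop i).take (j - i)
def pvSum (out : List (List String)) : Int := (out.map (fun x => (x.length : Int))).sum


lemma pal_small (l : List String) (i j : Nat) (h : j ≤ i + 1) :
    pvSl l i j = (pvSl l i j).reverse := by
  have hlen : (pvSl l i j).length ≤ 1 := by
    simp [pvSl]; omega
  match hh : pvSl l i j, hlen with
  | [], _ => rfl
  | [a], _ => rfl

lemma pvSl_decomp (l : List String) (i j : Nat) (h2 : i + 2 ≤ j) (hj : j ≤ l.length) :
    pvSl l i j = l[i]'(by omega) :: (pvSl l (i+1) (j-1) ++ [l[j-1]'(by omega)]) := by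
  have hi : i < l.length := by omega
  unfold pvSl
  rw [List.drop_eq_getElem_cons hi]
  have hji : j - i = (j - i - 2) + 1 + 1 := by omega
  rw [hji, List.take_succ_cons, List.take_add_one]
  have hmid : j - 1 - (i + 1) = j - i - 2 := by omega
  rw [hmid]
  congr 1
  have hlt : j - i - 2 < (l.drop (i+1)).length := by simp; omega
  rw [List.getElem?_eq_getElem hlt]
  have hidx : i + 1 + (j - i - 2) = j - 1 := by omega
  simp [List.getElem_drop, hidx]

lemma pal_rec (l : List String) (i j : Nat) (h2 : i + 2 ≤ j) (hj : j ≤ l.length) :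
    (pvSl l i j = (pvSl l i j).reverse) ↔
      (l[i]'(by omega) = l[j-1]'(by omega) ∧ pvSl l (i+1) (j-1) = (pvSl l (i+1) (j-1)).reverse) := by
  rw [pvSl_decomp l i j h2 hj]
  constructor
  · intro h
    simp only [List.reverse_cons, List.reverse_append, List.reverse_nil, List.nil_append,
      List.cons_append, List.cons.injEq] at h
    obtain ⟨hab, hrest⟩ := h
    refine ⟨hab, ?_⟩
    have := List.append_inj_left' hrest (by simp)
    simpa using this
  · rintro ⟨hab, hm⟩
    conv_lhs => rw [hab, hm]
    simp [hab]

lemma rev_eq (l : List String) : get_rev_order l = l.reverse := by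
  unfold get_rev_order
  by_cases h1 : l.length = 1
  · match l, h1 with
    | [a], _ => simp
  · rw [if_neg (by simp [h1])]
    rw [PySem.List.pyRange_neg_one]
    have ht : ((l.length : Int) - 1 - (-1)).toNat = l.length := by omega
    rw [ht, List.foldl_map, PySem.List.foldl_append_singleton_eq_map]
    apply List.ext_getElem
    · simp
    · intro i hi _
      simp only [List.nil_append, List.getElem_map, List.getElem_range]
      have hlen : (List.range l.length).length = l.length := by simp
      have hi' : i < l.length := by simpa using hi
      have hidx : (l.length : Int) - 1 - (i : Int) = ((l.length - 1 - i : Nat) : Int) := by omega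
      rw [hidx, PySem.List.pyGetD_natCast]
      rw [List.getElem_reverse]
      rw [List.getD_eq_getElem _ _ (by omega)]

lemma slice_eq_pvSl (l : List String) (i j : Nat) :
    PySem.List.slice l (some (i : Int)) (some (j : Int)) = pvSl l i j := by
  simpa [pvSl] using PySem.List.slice_natCast l i j

lemma length_pvSl (l : List String) (i j : Nat) (hj : j ≤ l.length) :
    (pvSl l i j).length = j - i := by
  simp [pvSl]; omega

lemma pvSum_append (out : List (List String)) (x : List String) :
    pvSum (out ++ [x]) = pvSum out + (x.length : Int) := by
  simp [pvSum]

lemma pvSum_erase (out : List (List String)) (a : List String) (h : a ∈ out) :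
    pvSum (out.erase a) = pvSum out - (a.length : Int) := by
  have hperm : out.Perm (a :: out.erase a) := List.perm_cons_erase h
  have := (hperm.map (fun x => (x.length : Int))).sum_eq
  simp only [List.map_cons, List.sum_cons] at this
  unfold pvSum
  omega

def pvR (ls : List String) (n : Nat) : Nat → List Bool
  | 0 => PySem.List.pyRepeat [true] ((n : Int) + 1)
  | (m+1) => pvRow ls (n : Int) ((n : Int) - (m : Int) - 1) (pvR ls n m)

lemma pvR_get (ls : List String) (n : Nat) (hn : ls.length = n) :
    ∀ (m j : Nat), m ≤ n → j ≤ n →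
    PySem.List.pyGetD (pvR ls n m) (j : Int) false =
      decide (pvSl ls (n - m) j = (pvSl ls (n - m) j).reverse) := by
  intro m
  induction m with
  | zero =>
    intro j _ hj
    have hrep : pvR ls n 0 = List.replicate (n+1) true := by
      show PySem.List.pyRepeat [true] ((n : Int) + 1) = _
      rw [PySem.List.pyRepeat_singleton]
      have h' : ((n : Int) + 1).toNat = n + 1 := by omega
      rw [h']
    rw [hrep, PySem.List.pyGetD_natCast]
    rw [List.getD_eq_getElem _ _ (by simp; omega)]
    simp only [List.getElem_replicate]
    exact (decide_eq_true (pal_small ls (n - 0) j (by omega))).symm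
  | succ m ih =>
    intro j hm hj
    have hstep : ((n : Int) - (m : Int) - 1) = ((n - (m+1) : Nat) : Int) := by omega
    show PySem.List.pyGetD (pvRow ls (n : Int) ((n : Int) - (m : Int) - 1) (pvR ls n m)) (j : Int) false = _
    unfold pvRow
    have hcast : ((n : Int) + 1) = ((n + 1 : Nat) : Int) := by push_cast; ring
    rw [hcast, PySem.List.pyGetD_map_pyRange _ (n+1) j false (by omega)]
    set s : Nat := n - (m+1) with hs
    rw [hstep]
    by_cases hsmall : j ≤ s + 1
    · have h1 : ((j : Int) - (s : Int) ≤ 1) := by omega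
      simp only [decide_eq_true h1, Bool.true_or]
      exact (decide_eq_true (pal_small ls s j hsmall)).symm
    · have h1 : ¬ ((j : Int) - (s : Int) ≤ 1) := by omega
      simp only [decide_eq_false h1, Bool.false_or]
      have hj1 : ((j : Int) - 1) = ((j - 1 : Nat) : Int) := by omega
      rw [hj1, ih (j-1) (by omega) (by omega)]
      have hnm : n - m = s + 1 := by omega
      rw [hnm]
      -- indexing in range
      have hsr : s < ls.length := by omega
      have hjr : j - 1 < ls.length := by omega
      rw [PySem.List.pyGetD_natCast, PySem.List.pyGetD_natCast]
      rw [List.getD_eq_getElem _ _ hsr, List.getD_eq_getElem _ _ hjr]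
      have hiff := pal_rec ls s j (by omega) (by omega)
      rw [decide_eq_decide.mpr hiff, Bool.decide_and]
      by_cases he : ls[s] = ls[j-1] <;> simp [he]

lemma pvRows_aux (ls : List String) (n : Nat) :
    ∀ k, k ≤ n →
    (PySem.List.pyRange 0 (k : Int) 1).foldl
      (fun rows kk => pvRow ls (n : Int) ((n : Int) - 1 - kk) (PySem.List.pyGetD rows 0 []) :: rows)
      [pvR ls n 0] = (List.range (k+1)).map (fun i => pvR ls n (k - i)) := by
  intro k
  induction k with
  | zero => intro _; simp [PySem.List.pyRange_one_eq_nil]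
  | succ k ih =>
    intro hk
    have hc : ((k+1 : Nat) : Int) = (k : Int) + 1 := by push_cast; ring
    rw [hc, PySem.List.pyRange_one_succ_right (by omega), List.foldl_append, ih (by omega)]
    simp only [List.foldl_cons, List.foldl_nil]
    have hhead : PySem.List.pyGetD ((List.range (k+1)).map (fun i => pvR ls n (k - i))) 0 [] =
        pvR ls n k := by
      rw [List.range_succ_eq_map]
      simp [PySem.List.pyGetD_zero_cons]
    rw [hhead]
    have hrow : pvRow ls (n : Int) ((n : Int) - 1 - (k : Int)) (pvR ls n k) = pvR ls n (k+1) := by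
      show _ = pvRow ls (n : Int) ((n : Int) - (k : Int) - 1) (pvR ls n k)
      congr 1
      omega
    rw [hrow]
    conv_rhs => rw [List.range_succ_eq_map, List.map_cons, List.map_map,
                    List.range_succ_eq_map, List.map_cons, List.map_map]
    conv_lhs => rw [List.range_succ_eq_map, List.map_cons, List.map_map]
    simp [Function.comp_def, Nat.succ_sub_succ]

lemma pvRows_get (ls : List String) (n : Nat) (s : Nat) (hs : s ≤ n) :
    PySem.List.pyGetD (pvRows ls (n : Int)) (s : Int) [] = pvR ls n (n - s) := by
  show PySem.List.pyGetD
    ((PySem.List.pyRange 0 (n:Int) 1).foldl _ [PySem.List.pyRepeat [true] ((n:Int) + 1)]) _ _ = _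
  have h0 : [PySem.List.pyRepeat ([true] : List Bool) ((n:Int) + 1)] = [pvR ls n 0] := by
    simp [pvR]
  rw [h0, pvRows_aux ls n n (le_refl n), PySem.List.pyGetD_natCast]
  rw [List.getD_eq_getElem _ _ (by simp; omega)]
  simp

lemma body_eq (ls : List String) (n s j : Nat) (hn : ls.length = n) (hs : s < n)
    (hj1 : s + 1 ≤ j) (hj2 : j ≤ n) (row : List Bool)
    (hrow : PySem.List.pyGetD row (j : Int) false =
      decide (pvSl ls s j = (pvSl ls s j).reverse))
    (acc : List (List String)) :
    pvBodyB ls row (s : Int) (acc, pvSum acc) (j : Int) =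
      (pvBodyA ls (s : Int) acc (j : Int), pvSum (pvBodyA ls (s : Int) acc (j : Int))) := by
  have hlen : ((pvSl ls s j).length : Int) = (j : Int) - (s : Int) := by
    rw [length_pvSl ls s j (by omega)]; omega
  simp only [pvBodyA, pvBodyB, hrow, slice_eq_pvSl, rev_eq]
  by_cases hp : pvSl ls s j = (pvSl ls s j).reverse
  · have hb : (pvSl ls s j == (pvSl ls s j).reverse) = true := by
      simpa [beq_iff_eq] using hp
    simp only [decide_eq_true hp, hb, if_true]
    by_cases hj' : j = 1
    · have hs0 : s = 0 := by omega
      subst hj' hs0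
      have hl1 : ((pvSl ls 0 1).length : Int) = 1 := by simpa using hlen
      have hn1 : (pvSl ls 0 1).length = 1 := by exact_mod_cast hl1
      simp only [Nat.cast_one, Nat.cast_zero, beq_self_eq_true, Bool.true_and, hl1]
      simp [hn1, pvSum_append]
    · -- j ≠ 1
      have hg : (((j : Nat) : Int) == (1 : Int)) = false := by
        simp only [beq_eq_false_iff_ne, ne_eq]
        omega
      simp only [hg, Bool.false_and, Bool.false_eq_true, if_false]
      have hsum : (List.map (fun x => ((x.length : Int))) acc).sum = pvSum acc := rfl
      simp only [hsum, hlen]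
      by_cases hc1 : ((s : Int) ≤ pvSum acc - 1)
      · by_cases hc2 : ((j : Int) - (s : Int) > ((PySem.List.pyGetD acc (-1) []).length : Int))
        · -- replacement branch
          have hpos : (1 : Int) ≤ pvSum acc := by
            have := Int.natCast_nonneg s
            omega
          have hne : acc ≠ [] := by
            intro h
            rw [h] at hpos
            simp [pvSum] at hpos
          have hlast : PySem.List.pyGetD acc (-1) [] = acc.getLast hne :=
            PySem.List.pyGetD_neg_one (xs := acc) [] hne
          have hmem : PySem.List.pyGetD acc (-1) [] ∈ acc := by
            rw [hlast]; exact List.getLast_mem hne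
          have hrem : (PySem.List.remove? acc (PySem.List.pyGetD acc (-1) [])).getD acc =
              acc.erase (PySem.List.pyGetD acc (-1) []) := by
            rw [PySem.List.remove?_eq_some_erase acc _ hmem]; rfl
          have herase := pvSum_erase acc _ hmem
          simp only [decide_eq_true hc1, decide_eq_true hc2, Bool.and_self, if_true, hrem]
          by_cases ho :
              (PySem.List.slice (PySem.List.pyGetD acc (-1) []) (some 0)
                (some (-((j : Int) - (s : Int))))).length = 0
          · simp only [ho, beq_self_eq_true, Bool.not_true, Bool.false_eq_true, if_false]
            refine Prod.ext rfl ?_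
            simp only [pvSum_append, herase, hlen]
          · have hob : ((PySem.List.slice (PySem.List.pyGetD acc (-1) []) (some 0)
                (some (-((j : Int) - (s : Int))))).length == 0) = false := by
              simpa using ho
            simp only [hob, Bool.not_false, if_true]
            refine Prod.ext rfl ?_
            simp only [pvSum_append, herase, hlen]
        · have hc2' : (decide ((j : Int) - (s : Int) > ((PySem.List.pyGetD acc (-1) []).length : Int))) = false :=
            decide_eq_false hc2
          have hng : ¬ ((s : Int) > pvSum acc - 1) := by omega
          simp only [hc2', Bool.and_false, Bool.false_eq_true, if_false, decide_eq_false hng]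
      · have hc1' : (decide ((s : Int) ≤ pvSum acc - 1)) = false := decide_eq_false hc1
        have hgt : ((s : Int) > pvSum acc - 1) := by omega
        simp only [hc1', Bool.false_and, Bool.false_eq_true, if_false, decide_eq_true hgt, if_true]
        refine Prod.ext rfl ?_
        simp only [pvSum_append, hlen]
  · have hb : (pvSl ls s j == (pvSl ls s j).reverse) = false := by
      simpa [beq_iff_eq] using hp
    simp only [decide_eq_false hp, hb, Bool.false_eq_true, if_false]

lemma inner_fold (ls : List String) (n s : Nat) (hn : ls.length = n) (hs : s < n)
    (row : List Bool)
    (hrowall : ∀ j : Nat, s + 1 ≤ j → j ≤ n →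
      PySem.List.pyGetD row (j : Int) false =
        decide (pvSl ls s j = (pvSl ls s j).reverse)) :
    ∀ (js : List Int), (∀ x ∈ js, ∃ jn : Nat, x = (jn : Int) ∧ s + 1 ≤ jn ∧ jn ≤ n) →
    ∀ acc : List (List String),
    js.foldl (pvBodyB ls row (s : Int)) (acc, pvSum acc) =
      (js.foldl (fun a l => pvBodyA ls (s : Int) a l) acc,
       pvSum (js.foldl (fun a l => pvBodyA ls (s : Int) a l) acc)) := by
  intro js
  induction js with
  | nil => intro _ acc; simp
  | cons x t ih =>
    intro hmem acc
    obtain ⟨jn, hx, hj1, hj2⟩ := hmem x (List.mem_cons_self ..)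
    subst hx
    simp only [List.foldl_cons]
    rw [body_eq ls n s jn hn hs hj1 hj2 row (hrowall jn hj1 hj2) acc]
    exact ih (fun y hy => hmem y (List.mem_cons_of_mem _ hy)) _

lemma outer_fold (ls : List String) (n : Nat) (hn : ls.length = n) :
    ∀ (ks : List Int), (∀ x ∈ ks, ∃ kn : Nat, x = (kn : Int) ∧ kn < n) →
    ∀ acc : List (List String),
    ks.foldl (fun st step =>
        (PySem.List.pyRange (step + 1) ((n : Int) + 1) 1).foldl
          (pvBodyB ls (PySem.List.pyGetD (pvRows ls (n : Int)) step []) step) st)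
      (acc, pvSum acc) =
      (ks.foldl (fun a step =>
          (PySem.List.pyRange (step + 1) ((n : Int) + 1) 1).foldl
            (fun a l => pvBodyA ls step a l) a) acc,
       pvSum (ks.foldl (fun a step =>
          (PySem.List.pyRange (step + 1) ((n : Int) + 1) 1).foldl
            (fun a l => pvBodyA ls step a l) a) acc)) := by
  intro ks
  induction ks with
  | nil => intro _ acc; simp
  | cons x t ih =>
    intro hmem acc
    obtain ⟨kn, hx, hk⟩ := hmem x (List.mem_cons_self ..)
    subst hx
    simp only [List.foldl_cons]
    have hrowall : ∀ j : Nat, kn + 1 ≤ j → j ≤ n →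
        PySem.List.pyGetD (PySem.List.pyGetD (pvRows ls (n : Int)) (kn : Int) []) (j : Int) false =
          decide (pvSl ls kn j = (pvSl ls kn j).reverse) := by
      intro j hj1 hj2
      rw [pvRows_get ls n kn (by omega), pvR_get ls n hn (n - kn) j (by omega) hj2]
      have : n - (n - kn) = kn := by omega
      rw [this]
    have hin := inner_fold ls n kn hn hk _ hrowall (PySem.List.pyRange ((kn : Int) + 1) ((n : Int) + 1) 1)
      (by
        intro x hx
        rw [PySem.List.mem_pyRange_one] at hx
        exact ⟨x.toNat, by omega, by omega, by omega⟩) acc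
    rw [hin]
    exact ih (fun y hy => hmem y (List.mem_cons_of_mem _ hy)) _

theorem main_eq (string : String) : driver_function string = driver_function_alt string := by
  unfold driver_function driver_function_alt
  set ls : List String := string.toList.map (fun c => String.ofList [c]) with hls
  have hn : ls.length = string.toList.length := by simp [hls]
  have h0 : (([], (0 : Int)) : List (List String) × Int) = ([], pvSum []) := rfl
  rw [h0]
  dsimp only
  rw [outer_fold ls string.toList.length hn (PySem.List.pyRange 0 (string.toList.length : Int) 1)
    (by
      intro x hx
      rw [PySem.List.mem_pyRange_one] at hx
      exact ⟨x.toNat, by omega, by omega⟩) []]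

-- ===== VERDICT (by name: the statement is the Claim_ definition above) =====
theorem driver_function_spec : Claim_equal_driver_function := by
  intro s _
  show driver_function s = driver_function_alt s
  exact main_eq s
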